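-- pv_equiv track=rewrite | github.com/dfacoet/aoc-python | 2015/2015-05_solution.py | is_very_nice
-- ===== SOURCE A (Python) =====
-- def is_very_nice(s: str) -> bool:
--     if len(s) < 4:
--         return False
--
--     consecutive_pairs = [s[i : i + 2] for i in range(len(s) - 1)]
--     for i, pair in enumerate(consecutive_pairs[:-2]):
--         if pair in consecutive_pairs[i + 2 :]:
--             break
--     else:
--         return False
--
--     for i, c in enumerate(s[:-2]):
--         if c == s[i + 2]:
--             return True
--     return False
-- ===== SOURCE B (Python) =====
-- def is_very_nice(s: str) -> bool:
--     if len(s) < 4: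
--         return False
--     first = {}
--     has_pair = False
--     for i in range(len(s) - 1):
--         p = s[i:i + 2]
--         j = first.get(p)
--         if j is None:
--             first[p] = i
--         elif i - j >= 2:
--             has_pair = True
--             break
--     if not has_pair:
--         return False
--     return any(a == b for a, b in zip(s, s[2:]))
-- ===== Notes on version B (the rewrite author's own statement) =====
-- stated objective: faster
-- what changed: Replaces A's quadratic scan (for each pair, search the remaining pair list) with a single pass keeping a dict of each pair's first index, and replaces the index-based aba loop with a zip scan.
import Mathlib
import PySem

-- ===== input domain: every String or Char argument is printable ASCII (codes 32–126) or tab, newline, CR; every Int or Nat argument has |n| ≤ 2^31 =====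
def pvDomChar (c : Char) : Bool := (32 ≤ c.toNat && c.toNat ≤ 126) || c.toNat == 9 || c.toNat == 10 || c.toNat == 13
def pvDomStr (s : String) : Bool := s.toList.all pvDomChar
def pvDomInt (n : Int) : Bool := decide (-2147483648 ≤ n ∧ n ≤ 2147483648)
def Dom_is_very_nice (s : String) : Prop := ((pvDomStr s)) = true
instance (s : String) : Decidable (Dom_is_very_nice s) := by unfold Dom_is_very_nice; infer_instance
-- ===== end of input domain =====

-- B replaces A's quadratic pair search (each pair searched for in the rest of the pair list)
-- with one pass over a dict of first pair indices, and the index-based aba loop with a zip scan.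

-- ===== PORT A =====
-- Python 2-character substrings s[i:i+2] are ported as their List Char values
-- (string equality/membership coincides with List Char equality/membership on these slices).
def is_very_nice (s : String) : Bool :=
  let cs := s.toList
  let n := cs.length
  if n < 4 then false
  else
    let pairs := (PySem.List.pyRange 0 ((n : Int) - 1) 1).map
      (fun i => PySem.List.slice cs (some i) (some (i + 2)))
    -- for-else over enumerate(consecutive_pairs[:-2]); the loop's only effect is whether it breaks
    if (PySem.List.enumerate (PySem.List.slice pairs none (some (-2))) 0).any
        (fun ip => (PySem.List.slice pairs (some (ip.1 + 2)) none).contains ip.2) then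
      -- second loop: for i, c in enumerate(s[:-2]): if c == s[i+2]  (index i+2 always in range)
      (PySem.List.enumerate (PySem.List.slice cs none (some (-2))) 0).any
        (fun ic => PySem.List.pyGet? cs (ic.1 + 2) == some ic.2)
    else false

-- ===== PORT B =====
-- the dict loop of Source B: first : pair -> index of its first occurrence; true on a repeat ≥ 2 apart
def bPairLoop (cs : List Char) (n : Nat) (i : Nat) (d : PySem.Dict (List Char) Nat) : Bool :=
  if i < n - 1 then
    let p := (cs.drop i).take 2          -- s[i:i+2]
    match d.get? p with
    | none => bPairLoop cs n (i + 1) (d.insert p i)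
    | some j => if 2 ≤ i - j then true else bPairLoop cs n (i + 1) d
  else false
termination_by n - 1 - i

def is_very_nice_alt (s : String) : Bool :=
  let cs := s.toList
  if cs.length < 4 then false
  else if bPairLoop cs cs.length 0 PySem.Dict.empty then
    -- any(a == b for a, b in zip(s, s[2:]))
    (cs.zip (cs.drop 2)).any (fun ab => ab.1 == ab.2)
  else false

-- ===== PRECONDITION & SPEC =====
def Spec_is_very_nice (s : String) (out : Bool) : Prop := out = is_very_nice_alt s
instance (s : String) (out : Bool) : Decidable (Spec_is_very_nice s out) := by unfold Spec_is_very_nice; infer_instance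

-- ===== CLAIM (what is proved, stated in full; the proofs are below) =====
def Claim_equal_is_very_nice : Prop := ∀ (s : String), Dom_is_very_nice s → Spec_is_very_nice s (is_very_nice s)

-- ===== LEMMAS AND PROOFS =====

-- the pair of characters starting at index i
def pvPair (cs : List Char) (i : Nat) : List Char := (cs.drop i).take 2

-- the common characterisation of both repeated-pair phases: a pair repeats without overlap
def pvRep (cs : List Char) : Prop :=
  ∃ a b, a + 2 ≤ b ∧ b + 1 < cs.length ∧ pvPair cs a = pvPair cs b

-- the dict holds exactly the first occurrence index of every pair seen so far
def pvInv (cs : List Char) (i : Nat) (d : PySem.Dict (List Char) Nat) : Prop :=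
  ∀ p j, d.get? p = some j ↔ (j < i ∧ pvPair cs j = p ∧ ∀ k < j, pvPair cs k ≠ p)

-- no non-overlapping repeat ends before index i
def pvNo (cs : List Char) (i : Nat) : Prop :=
  ∀ a b, a + 2 ≤ b → b < i → pvPair cs a ≠ pvPair cs b

lemma bLoop_main (cs : List Char) (m : Nat) :
    ∀ i d, cs.length - 1 - i ≤ m → pvInv cs i d → pvNo cs i →
      (bPairLoop cs cs.length i d = true ↔ pvRep cs) := by
  induction m with
  | zero =>
    intro i d hm hInv hNo
    have hi : ¬ i < cs.length - 1 := by omega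
    rw [bPairLoop, if_neg hi]
    simp only [Bool.false_eq_true, false_iff]
    rintro ⟨a, b, hab, hb, hp⟩
    exact hNo a b hab (by omega) hp
  | succ m ih =>
    intro i d hm hInv hNo
    by_cases hi : i < cs.length - 1
    · rw [bPairLoop, if_pos hi]
      show (match d.get? (pvPair cs i) with
        | none => bPairLoop cs cs.length (i + 1) (d.insert (pvPair cs i) i)
        | some j => if 2 ≤ i - j then true else bPairLoop cs cs.length (i + 1) d) = true ↔ pvRep cs
      cases hd : d.get? (pvPair cs i) with
      | none =>
        have hnone : ∀ k < i, pvPair cs k ≠ pvPair cs i := by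
          intro k hk hkp
          have hex : ∃ k, k < i ∧ pvPair cs k = pvPair cs i := ⟨k, hk, hkp⟩
          have hj := Nat.find_spec hex
          have hmin : ∀ k' < Nat.find hex, ¬(k' < i ∧ pvPair cs k' = pvPair cs i) :=
            fun k' hk' => Nat.find_min hex hk'
          have : d.get? (pvPair cs i) = some (Nat.find hex) := by
            rw [hInv]
            exact ⟨hj.1, hj.2, fun k' hk' hpk' => hmin k' hk' ⟨by omega, hpk'⟩⟩
          rw [hd] at this; simp at this
        apply ih (i + 1) _ (by omega)
        · intro p' j
          by_cases hpp : p' = pvPair cs i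
          · subst hpp
            rw [PySem.Dict.get?_insert_self]
            constructor
            · rintro h
              have hj : j = i := (Option.some_inj.mp h).symm
              subst hj
              exact ⟨by omega, rfl, hnone⟩
            · rintro ⟨hj, hpj, hmin⟩
              have : j = i := by
                by_contra hne
                exact hnone j (by omega) hpj
              subst this; rfl
          · rw [PySem.Dict.get?_insert_of_ne d i hpp, hInv]
            constructor
            · rintro ⟨hj, hpj, hmin⟩; exact ⟨by omega, hpj, hmin⟩
            · rintro ⟨hj, hpj, hmin⟩
              refine ⟨?_, hpj, hmin⟩
              have : j ≠ i := fun h => hpp (h ▸ hpj).symm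
              omega
        · intro a b hab hb hp
          by_cases hbi : b < i
          · exact hNo a b hab hbi hp
          · have : b = i := by omega
            subst this
            exact hnone a (by omega) hp
      | some j =>
        have hj := (hInv (pvPair cs i) j).mp hd
        show (if 2 ≤ i - j then true else bPairLoop cs cs.length (i + 1) d) = true ↔ pvRep cs
        by_cases h2 : 2 ≤ i - j
        · rw [if_pos h2]
          simp only [true_iff]
          exact ⟨j, i, by omega, by omega, hj.2.1.symm ▸ rfl⟩
        · rw [if_neg h2]
          apply ih (i + 1) d (by omega)
          · intro p' j'
            rw [hInv]
            constructor
            · rintro ⟨hj', hpj', hmin⟩; exact ⟨by omega, hpj', hmin⟩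
            · rintro ⟨hj', hpj', hmin⟩
              refine ⟨?_, hpj', hmin⟩
              by_contra hge
              have : j' = i := by omega
              subst this
              exact hmin j (by omega) (hpj' ▸ hj.2.1)
          · intro a b hab hb hp
            by_cases hbi : b < i
            · exact hNo a b hab hbi hp
            · have hbe : b = i := by omega
              subst hbe
              have hja : j ≤ a := by
                by_contra hlt
                exact hj.2.2 a (by omega) hp
              omega
    · rw [bPairLoop, if_neg hi]
      simp only [Bool.false_eq_true, false_iff]
      rintro ⟨a, b, hab, hb, hp⟩
      exact hNo a b hab (by omega) hp

lemma bLoop_iff (cs : List Char) :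
    (bPairLoop cs cs.length 0 PySem.Dict.empty = true) ↔ pvRep cs := by
  apply bLoop_main cs (cs.length) 0 PySem.Dict.empty (by omega)
  · intro p j
    rw [PySem.Dict.get?_empty]
    simp
  · intro a b _ hb
    omega

lemma phaseA_iff (cs : List Char) :
    ((PySem.List.enumerate
        (PySem.List.slice ((PySem.List.pyRange 0 ((cs.length : Int) - 1) 1).map
          (fun i => PySem.List.slice cs (some i) (some (i + 2)))) none (some (-2))) 0).any
      (fun ip => (PySem.List.slice ((PySem.List.pyRange 0 ((cs.length : Int) - 1) 1).map
          (fun i => PySem.List.slice cs (some i) (some (i + 2)))) (some (ip.1 + 2)) none).contains ip.2) = true)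
    ↔ pvRep cs := by
  set pairs := (PySem.List.pyRange 0 ((cs.length : Int) - 1) 1).map
      (fun i => PySem.List.slice cs (some i) (some (i + 2))) with hpairs
  have hlen : pairs.length = cs.length - 1 := by
    rw [hpairs]; simp [PySem.List.length_pyRange_one]
  have hget : ∀ i (h : i < pairs.length), pairs[i] = pvPair cs i := by
    intro i h
    have hi : i < cs.length - 1 := hlen ▸ h
    simp only [hpairs, List.getElem_map]
    rw [PySem.List.getElem_pyRange_one]
    have h0 : (0 : Int) + (i : Int) = ((i : Nat) : Int) := by ring
    have h2 : (0 : Int) + (i : Int) + 2 = ((i : Nat) : Int) + ((2 : Nat) : Int) := by push_cast; ring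
    rw [h2, h0, PySem.List.slice_natCast_add]
    rfl
  rw [PySem.List.slice_to_neg_ofNat pairs 2 (by omega)]
  simp only [List.any_eq_true]
  constructor
  · rintro ⟨ip, hmem, hc⟩
    rw [PySem.List.mem_enumerate_iff] at hmem
    obtain ⟨k, hk, rfl⟩ := hmem
    simp only [List.length_take, hlen] at hk
    have hk' : k < cs.length - 1 - 2 := by omega
    simp only [List.getElem_take] at hc
    have hsl : PySem.List.slice pairs (some ((0 : Int) + (k : Int) + 2)) none = pairs.drop (k + 2) := by
      have : (0 : Int) + (k : Int) + 2 = ((k + 2 : Nat) : Int) := by push_cast; ring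
      rw [this, PySem.List.slice_from_natCast]
    rw [hsl, List.contains_iff_mem, List.mem_iff_getElem] at hc
    obtain ⟨j, hj, hj2⟩ := hc
    simp only [List.length_drop, hlen] at hj
    rw [List.getElem_drop] at hj2
    refine ⟨k, k + 2 + j, by omega, by omega, ?_⟩
    rw [← hget k (by omega), ← hget (k + 2 + j) (by rw [hlen]; omega), hj2]
  · rintro ⟨a, b, hab, hb, hp⟩
    refine ⟨((a : Int), pvPair cs a), ?_, ?_⟩
    · rw [PySem.List.mem_enumerate_iff]
      refine ⟨a, ?_, ?_⟩
      · simp only [List.length_take, hlen]; omega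
      · simp only [List.getElem_take]
        rw [hget a (by rw [hlen]; omega)]
        simp
    · have hsl : PySem.List.slice pairs (some (((a : Int), pvPair cs a).1 + 2)) none
          = pairs.drop (a + 2) := by
        have : ((a : Int)) + 2 = ((a + 2 : Nat) : Int) := by push_cast; ring
        simp only [this, PySem.List.slice_from_natCast]
      rw [hsl, List.contains_iff_mem, List.mem_iff_getElem]
      refine ⟨b - (a + 2), ?_, ?_⟩
      · simp only [List.length_drop, hlen]; omega
      · rw [List.getElem_drop]
        have hb2 : a + 2 + (b - (a + 2)) = b := by omega
        rw [hget (a + 2 + (b - (a + 2))) (by rw [hlen]; omega), hb2]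
        exact hp.symm

lemma phase2_eq (cs : List Char) :
    ((PySem.List.enumerate (PySem.List.slice cs none (some (-2))) 0).any
      (fun ic => PySem.List.pyGet? cs (ic.1 + 2) == some ic.2))
    = ((cs.zip (cs.drop 2)).any (fun ab => ab.1 == ab.2)) := by
  rw [PySem.List.slice_to_neg_ofNat cs 2 (by omega)]
  apply Bool.eq_iff_iff.mpr
  simp only [List.any_eq_true]
  constructor
  · rintro ⟨ip, hmem, hp⟩
    rw [PySem.List.mem_enumerate_iff] at hmem
    obtain ⟨k, hk, rfl⟩ := hmem
    simp only [List.length_take] at hk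
    have hk2 : k + 2 < cs.length := by omega
    simp only [List.getElem_take] at hp
    have he : ((0 : Int) + (k : Int)) + 2 = ((k + 2 : Nat) : Int) := by push_cast; ring
    rw [he, PySem.List.pyGet?_natCast] at hp
    rw [List.getElem?_eq_getElem hk2] at hp
    refine ⟨(cs[k], cs[k+2]), ?_, ?_⟩
    · rw [List.mem_iff_getElem]
      refine ⟨k, by simp [List.length_zip, List.length_drop]; omega, ?_⟩
      simp [List.getElem_zip, List.getElem_drop, Nat.add_comm 2 k]
    · simp only [beq_iff_eq, Option.some_inj] at hp
      simp [hp]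
  · rintro ⟨ab, hmem, hp⟩
    rw [List.mem_iff_getElem] at hmem
    obtain ⟨k, hk, rfl⟩ := hmem
    simp only [List.length_zip, List.length_drop] at hk
    have hk2 : k + 2 < cs.length := by omega
    simp only [List.getElem_zip, List.getElem_drop] at hp ⊢
    refine ⟨((k : Int), cs[k]'(by omega)), ?_, ?_⟩
    · rw [PySem.List.mem_enumerate_iff]
      refine ⟨k, by simp [List.length_take]; omega, ?_⟩
      simp [List.getElem_take]
    · have he : ((k : Int)) + 2 = ((k + 2 : Nat) : Int) := by push_cast; ring
      simp only [he, PySem.List.pyGet?_natCast]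
      rw [List.getElem?_eq_getElem hk2]
      simp only [beq_iff_eq] at hp
      simp [hp, Nat.add_comm 2 k]

-- ===== VERDICT (by name: the statement is the Claim_ definition above) =====
theorem is_very_nice_spec : Claim_equal_is_very_nice := by
  intro s _
  unfold Spec_is_very_nice is_very_nice is_very_nice_alt
  set cs := s.toList with hcs
  by_cases h4 : cs.length < 4
  · simp [h4]
  · simp only [h4, if_false]
    rw [phase2_eq cs]
    by_cases hp : pvRep cs
    · rw [if_pos ((phaseA_iff cs).mpr hp), if_pos ((bLoop_iff cs).mpr hp)]
    · rw [if_neg (fun h => hp ((phaseA_iff cs).mp h)),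
          if_neg (fun h => hp ((bLoop_iff cs).mp h))]
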